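-- pv_equiv track=rewrite | github.com/DGshkaaa/DotaParsing | app/services/stratz_client.py | decode_items_timeline
-- ===== SOURCE A (Python) =====
-- def decode_items_timeline(encoded_str):
--     """
--     Декодує таймлайн предметів від Stratz.
--     Повертає масив з масивами ID предметів для кожної хвилини.
--     """
--     if not encoded_str or not isinstance(encoded_str, str):
--         return []
--
--     try:
--         result = []
--         # Кожні 12 символів = 6 предметів (по 2 символи на предмет)
--         for i in range(0, len(encoded_str), 12):
--             chunk = encoded_str[i:i+12]
--             items = []
--             for j in range(0, len(chunk), 2):
--                 item_id = int(chunk[j:j+2], 16)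
--                 if item_id > 0:
--                     items.append(item_id)
--             result.append(items)
--         return result
--     except:
--         return []
-- ===== SOURCE B (Python) =====
-- def decode_items_timeline(encoded_str):
--     """Flat two-phase rewrite: decode every 2-char code in one pass, then group by 6."""
--     if not encoded_str or not isinstance(encoded_str, str):
--         return []
--     try:
--         codes = [int(encoded_str[k:k+2], 16) for k in range(0, len(encoded_str), 2)]
--     except:
--         return []
--     return [[c for c in codes[m:m+6] if c > 0] for m in range(0, len(codes), 6)]
-- ===== Notes on version B (the rewrite author's own statement) =====
-- stated objective: alternative
-- what changed: A's interleaved nested loops (slice 12-char chunks, then parse-and-filter each chunk's 2-char codes) are replaced by a two-phase pipeline: one flat pass decoding every 2-char hex code of the whole string, then a reshape pass grouping the codes by 6 and filtering the positives.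
import Mathlib
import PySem

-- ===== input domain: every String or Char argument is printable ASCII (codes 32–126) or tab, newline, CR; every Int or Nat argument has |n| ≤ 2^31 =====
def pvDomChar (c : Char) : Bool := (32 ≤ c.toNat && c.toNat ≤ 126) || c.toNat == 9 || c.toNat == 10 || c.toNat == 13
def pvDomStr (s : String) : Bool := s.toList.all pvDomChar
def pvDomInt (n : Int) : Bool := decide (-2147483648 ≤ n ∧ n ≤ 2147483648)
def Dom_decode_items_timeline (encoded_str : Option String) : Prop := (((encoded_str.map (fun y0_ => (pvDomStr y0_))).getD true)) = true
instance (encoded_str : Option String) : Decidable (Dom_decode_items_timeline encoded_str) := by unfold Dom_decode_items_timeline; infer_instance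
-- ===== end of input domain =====

-- B replaces A's interleaved chunk-by-12-then-parse-by-2 nested loops with a two-phase
-- decomposition (decode all 2-char codes in one flat pass, then group the codes by 6);
-- same cost, different structure (objective: alternative).

-- ===== PORT A =====
-- inner loop of A: for j in range(0, len(chunk), 2): parse chunk[j:j+2] as hex, keep > 0
-- (Option models the exception caught by A's bare `except`: none = some int() raised)
def pvChunkItemsA (chunk : List Char) : Option (List Int) :=
  (PySem.List.pyRange 0 (chunk.length : Int) 2).foldl
    (fun acc j => acc.bind fun items =>
      (PySem.Int.ofCharsBase? (PySem.List.slice chunk (some j) (some (j + 2))) 16).map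
        (fun item_id => if item_id > 0 then items ++ [item_id] else items))
    (some [])

def decode_items_timeline (encoded_str : Option String) : List (List Int) :=
  match encoded_str with
  | none => []
  | some s =>
    let cs := s.toList
    if cs = [] then []
    else
      ((PySem.List.pyRange 0 (cs.length : Int) 12).foldl
        (fun acc i => acc.bind fun result =>
          (pvChunkItemsA (PySem.List.slice cs (some i) (some (i + 12)))).map
            (fun items => result ++ [items]))
        (some [])).getD []

-- ===== PORT B =====
-- flat pass of B: [int(encoded_str[k:k+2], 16) for k in range(0, len, 2)], none = some parse raised
def pvCodesB (cs : List Char) : Option (List Int) :=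
  (PySem.List.pyRange 0 (cs.length : Int) 2).foldl
    (fun acc k => acc.bind fun codes =>
      (PySem.Int.ofCharsBase? (PySem.List.slice cs (some k) (some (k + 2))) 16).map
        (fun v => codes ++ [v]))
    (some [])

-- grouping pass of B: [[c for c in codes[m:m+6] if c > 0] for m in range(0, len(codes), 6)]
def pvGroup6 (codes : List Int) : List (List Int) :=
  (PySem.List.pyRange 0 (codes.length : Int) 6).map
    (fun m => (PySem.List.slice codes (some m) (some (m + 6))).filter (fun c => c > 0))

def decode_items_timeline_alt (encoded_str : Option String) : List (List Int) :=
  match encoded_str with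
  | none => []
  | some s =>
    let cs := s.toList
    if cs = [] then []
    else
      match pvCodesB cs with
      | none => []
      | some codes => pvGroup6 codes

-- ===== PRECONDITION & SPEC =====
def Spec_decode_items_timeline (encoded_str : Option String) (out : List (List Int)) : Prop := out = decode_items_timeline_alt encoded_str
instance (encoded_str : Option String) (out : List (List Int)) : Decidable (Spec_decode_items_timeline encoded_str out) := by unfold Spec_decode_items_timeline; infer_instance

-- ===== CLAIM (what is proved, stated in full; the proofs are below) =====
def Claim_equal_decode_items_timeline : Prop := ∀ (encoded_str : Option String), Dom_decode_items_timeline encoded_str → Spec_decode_items_timeline encoded_str (decode_items_timeline encoded_str)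

-- ===== LEMMAS AND PROOFS =====

theorem pvPyRange_pos_cons (a b s : Int) (hs : 0 < s) (h : a < b) :
    PySem.List.pyRange a b s = a :: PySem.List.pyRange (a + s) b s := by
  rw [PySem.List.pyRange_of_pos a b hs, PySem.List.pyRange_of_pos (a+s) b hs]
  have hc : ((b - a + s - 1) / s).toNat
      = (if a + s < b then ((b - (a + s) + s - 1) / s).toNat else 0) + 1 := by
    by_cases h2 : a + s < b
    · rw [if_pos h2]
      have e : b - a + s - 1 = (b - (a + s) + s - 1) + 1 * s := by ring
      rw [e, Int.add_mul_ediv_right _ _ (by omega : s ≠ 0)]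
      have h0 : 0 ≤ (b - (a + s) + s - 1) / s := Int.ediv_nonneg (by omega) (by omega)
      omega
    · rw [if_neg h2]
      have e : b - a + s - 1 = (b - a - 1) + 1 * s := by ring
      rw [e, Int.add_mul_ediv_right _ _ (by omega : s ≠ 0)]
      have h0 : (b - a - 1) / s = 0 := Int.ediv_eq_zero_of_lt (by omega) (by omega)
      omega
  rw [if_pos h, hc, List.range_succ_eq_map]
  simp only [List.map_cons, List.map_map, Nat.cast_zero, mul_zero, add_zero]
  congr 1
  exact List.map_congr_left fun k _ => by simp [Function.comp]; push_cast; ring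

theorem pvPyRange_pos_shift (a b c s : Int) (hs : 0 < s) :
    PySem.List.pyRange (a + c) (b + c) s = (PySem.List.pyRange a b s).map (fun x => x + c) := by
  rw [PySem.List.pyRange_of_pos _ _ hs, PySem.List.pyRange_of_pos _ _ hs, List.map_map]
  have h1 : b + c - (a + c) = b - a := by ring
  have h2 : (if a + c < b + c then ((b - a + s - 1) / s).toNat else 0)
      = (if a < b then ((b - a + s - 1) / s).toNat else 0) := by
    by_cases hab : a < b
    · rw [if_pos (by omega), if_pos hab]
    · rw [if_neg (by omega), if_neg hab]
  rw [h1, h2]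
  exact List.map_congr_left fun k _ => by simp [Function.comp]; ring

theorem pvSliceDropShift {α : Type} (xs : List α) (c k : Nat) (j : Int) (hj : 0 ≤ j) :
    PySem.List.slice xs (some (j + c)) (some (j + c + k))
      = PySem.List.slice (xs.drop c) (some j) (some (j + k)) := by
  rw [PySem.List.slice_toNat xs (by omega) (by omega),
      PySem.List.slice_toNat (xs.drop c) hj (by omega)]
  have h1 : (j + (c : Int)).toNat = j.toNat + c := by omega
  have h2 : (j + c + (k : Int)).toNat - (j.toNat + c) = k := by omega
  have h3 : (j + (k : Int)).toNat - j.toNat = k := by omega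
  rw [h1, h2, h3, Nat.add_comm, ← List.drop_drop]

theorem pvPyRange_pos_nil (a b s : Int) (hs : 0 < s) (h : b ≤ a) :
    PySem.List.pyRange a b s = [] := by
  rw [PySem.List.pyRange_of_pos a b hs]
  simp [show ¬ a < b by omega]

def pvPairs : List Char → Option (List Int)
  | [] => some []
  | [a] => (PySem.Int.ofCharsBase? [a] 16).map (fun v => [v])
  | a :: b :: rest =>
    (PySem.Int.ofCharsBase? [a, b] 16).bind fun v => (pvPairs rest).map (fun l => v :: l)

theorem pvFoldlOptNone {α β : Type} (g : β → α → Option β) (l : List α) :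
    l.foldl (fun acc k => acc.bind fun out => g out k) none = none := by
  induction l <;> simp [*]

theorem pvSpine (g : List Int → Int → List Int) :
    ∀ (cs : List Char) (init : List Int),
    (PySem.List.pyRange 0 (cs.length : Int) 2).foldl
      (fun acc k => acc.bind fun out =>
        (PySem.Int.ofCharsBase? (PySem.List.slice cs (some k) (some (k + 2))) 16).map
          (fun v => g out v))
      (some init)
    = (pvPairs cs).map (fun l => l.foldl g init) := by
  intro cs
  induction cs using pvPairs.induct with
  | case1 =>
    intro init
    simp [pvPairs, pvPyRange_pos_nil 0 0 2 (by norm_num) (by norm_num)]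
  | case2 a =>
    intro init
    rw [show (([a] : List Char).length : Int) = 1 by simp,
        pvPyRange_pos_cons 0 1 2 (by norm_num) (by norm_num),
        pvPyRange_pos_nil (0+2) 1 2 (by norm_num) (by norm_num)]
    have hs : PySem.List.slice [a] (some 0) (some (0 + 2)) = [a] := by
      rw [PySem.List.slice_toNat _ (by norm_num) (by norm_num)]; rfl
    simp only [List.foldl_cons, List.foldl_nil, hs, Option.bind_some]
    cases h : PySem.Int.ofCharsBase? [a] 16 <;> simp [pvPairs, h]
  | case3 a b rest ih =>
    intro init
    have hlen : ((a :: b :: rest).length : Int) = (rest.length : Int) + 2 := by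
      simp; ring
    rw [hlen, pvPyRange_pos_cons 0 _ 2 (by norm_num) (by omega),
        show (0 : Int) + 2 = (0 : Int) + (2 : Int) by norm_num,
        pvPyRange_pos_shift 0 (rest.length : Int) 2 2 (by norm_num)]
    have hs0 : PySem.List.slice (a :: b :: rest) (some 0) (some (0 + 2)) = [a, b] := by
      rw [PySem.List.slice_toNat _ (by norm_num) (by norm_num)]; rfl
    simp only [List.foldl_cons, Option.bind_some, hs0, List.foldl_map]
    cases h : PySem.Int.ofCharsBase? [a, b] 16 with
    | none =>
      simp only [Option.map_none]
      rw [pvFoldlOptNone]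
      simp [pvPairs, h]
    | some v =>
      simp only [Option.map_some]
      rw [PySem.List.foldl_congr_mem _ _
        (fun acc j => acc.bind fun out =>
          (PySem.Int.ofCharsBase? (PySem.List.slice rest (some j) (some (j + 2))) 16).map
            (fun w => g out w)) _
        (by
          intro acc x hx
          have hx0 : 0 ≤ x := by
            have := (PySem.List.mem_pyRange_iff_of_pos (by norm_num) x).1 hx
            omega
          have h2 := pvSliceDropShift (a :: b :: rest) 2 2 x hx0
          simp only [List.drop] at h2
          push_cast at h2
          simp only [h2]),
        ih (g init v)]
      cases hp : pvPairs rest <;> simp [pvPairs, h, hp]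




theorem pvChunkItemsA_eq (chunk : List Char) :
    pvChunkItemsA chunk = (pvPairs chunk).map (fun l => l.filter (fun c => c > 0)) := by
  unfold pvChunkItemsA
  rw [pvSpine (fun out v => if v > 0 then out ++ [v] else out) chunk []]
  cases hp : pvPairs chunk with
  | none => rfl
  | some l =>
    simp only [Option.map_some, Option.some.injEq]
    have := PySem.List.foldl_append_if (fun c : Int => c > 0) id l []
    simpa using this

theorem pvCodesB_eq (cs : List Char) : pvCodesB cs = pvPairs cs := by
  unfold pvCodesB
  rw [pvSpine (fun out v => out ++ [v]) cs []]
  cases hp : pvPairs cs with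
  | none => rfl
  | some l =>
    simp only [Option.map_some, Option.some.injEq]
    simpa using PySem.List.foldl_append_singleton l []

theorem pvPairs_append_even (t r : List Char) (ht : t.length % 2 = 0) :
    pvPairs (t ++ r) = (pvPairs t).bind fun lt => (pvPairs r).map (fun lr => lt ++ lr) := by
  induction t using pvPairs.induct with
  | case1 => cases hp : pvPairs r <;> simp [pvPairs, hp]
  | case2 a => simp at ht
  | case3 a b rest ih =>
    have ht' : rest.length % 2 = 0 := by simp at ht; omega
    cases h : PySem.Int.ofCharsBase? [a, b] 16 with
    | none => simp [pvPairs, h]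
    | some v =>
      simp only [List.cons_append, pvPairs, h, Option.bind_some, ih ht']
      cases hp : pvPairs rest <;> cases hr : pvPairs r <;> simp

theorem pvPairs_length (cs : List Char) :
    ∀ l, pvPairs cs = some l → l.length = (cs.length + 1) / 2 := by
  induction cs using pvPairs.induct with
  | case1 => intro l h; simp [pvPairs] at h; simp [← h]
  | case2 a =>
    intro l h
    simp only [pvPairs] at h
    cases h' : PySem.Int.ofCharsBase? [a] 16 <;> simp [h'] at h
    simp [← h]
  | case3 a b rest ih =>
    intro l h
    simp only [pvPairs] at h
    cases h' : PySem.Int.ofCharsBase? [a, b] 16 <;> simp [h'] at h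
    cases hp : pvPairs rest <;> simp [hp] at h
    rename_i l' 
    have := ih l' hp
    simp [← h, this]
    omega

theorem pvGroup6_nil : pvGroup6 [] = [] := by
  simp [pvGroup6, PySem.List.pyRange]

theorem pvGroup6_small (l : List Int) (h0 : l ≠ []) (h6 : l.length ≤ 6) :
    pvGroup6 l = [l.filter (fun c => c > 0)] := by
  unfold pvGroup6
  have hpos : (0:Int) < l.length := by
    have := List.length_pos_iff.mpr h0; exact_mod_cast this
  rw [pvPyRange_pos_cons 0 _ 6 (by norm_num) hpos,
      pvPyRange_pos_nil (0+6) _ 6 (by norm_num) (by exact_mod_cast by omega)]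
  simp only [List.map_cons, List.map_nil]
  congr 1
  rw [PySem.List.slice_toNat _ (by norm_num) (by norm_num)]
  norm_num [show Int.toNat 6 = 6 from rfl, List.take_of_length_le h6]

theorem pvGroup6_cons (lt lr : List Int) (h : lt.length = 6) :
    pvGroup6 (lt ++ lr) = lt.filter (fun c => c > 0) :: pvGroup6 lr := by
  unfold pvGroup6
  have hlen : (((lt ++ lr).length : Nat) : Int) = (lr.length : Int) + 6 := by
    simp [h]; ring
  rw [hlen, pvPyRange_pos_cons 0 _ 6 (by norm_num) (by omega),
      show (0 : Int) + 6 = (0 : Int) + (6 : Int) by norm_num,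
      pvPyRange_pos_shift 0 (lr.length : Int) 6 6 (by norm_num)]
  simp only [List.map_cons, List.map_map]
  congr 1
  · rw [PySem.List.slice_toNat _ (by norm_num) (by norm_num)]
    norm_num [show Int.toNat 6 = 6 from rfl]
    rw [← h, List.take_left]
  · apply List.map_congr_left
    intro x hx
    have hx0 : 0 ≤ x := by
      have := (PySem.List.mem_pyRange_iff_of_pos (by norm_num) x).1 hx
      omega
    have h2 := pvSliceDropShift (lt ++ lr) 6 6 x hx0
    push_cast at h2
    rw [show (lt ++ lr).drop 6 = lr by rw [← h, List.drop_left]] at h2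
    simp [Function.comp, h2]

theorem pvOuter : ∀ (n : Nat) (cs : List Char), cs.length = n → ∀ (res : List (List Int)),
    (PySem.List.pyRange 0 (cs.length : Int) 12).foldl
      (fun acc i => acc.bind fun result =>
        (pvChunkItemsA (PySem.List.slice cs (some i) (some (i + 12)))).map
          (fun items => result ++ [items]))
      (some res)
    = (pvPairs cs).map (fun codes => res ++ pvGroup6 codes) := by
  intro n
  induction n using Nat.strong_induction_on with
  | _ n ih =>
    intro cs hlen res
    by_cases hnil : cs = []
    · subst hnil
      simp [pvPyRange_pos_nil 0 0 12 (by norm_num) (by norm_num), pvPairs, pvGroup6_nil]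
    · have hpos : 0 < cs.length := List.length_pos_iff.mpr hnil
      rw [pvPyRange_pos_cons 0 _ 12 (by norm_num) (by exact_mod_cast hpos)]
      have hs0 : PySem.List.slice cs (some 0) (some (0 + 12)) = cs.take 12 := by
        rw [PySem.List.slice_toNat _ (by norm_num) (by norm_num)]
        norm_num [show Int.toNat 12 = 12 from rfl]
      simp only [List.foldl_cons, Option.bind_some, hs0, pvChunkItemsA_eq]
      by_cases hle : cs.length ≤ 12
      · rw [List.take_of_length_le hle,
            pvPyRange_pos_nil (0+12) _ 12 (by norm_num) (by exact_mod_cast by omega)]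
        cases hp : pvPairs cs with
        | none => simp
        | some l =>
          have hl : l.length = (cs.length + 1) / 2 := pvPairs_length cs l hp
          have hne : l ≠ [] := by intro hx; subst hx; simp at hl; omega
          simp only [Option.map_some, List.foldl_nil]
          rw [pvGroup6_small l hne (by omega)]
      · -- cs.length > 12: split cs = take 12 ++ drop 12
        have hsplit : cs = cs.take 12 ++ cs.drop 12 := (List.take_append_drop 12 cs).symm
        have ht12 : (cs.take 12).length = 12 := by simp [List.length_take]; omega
        have hcast : (cs.length : Int) = ((cs.drop 12).length : Int) + 12 := by
          simp [List.length_drop]; omega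
        rw [hcast, show (0 : Int) + 12 = (0 : Int) + (12 : Int) by norm_num,
            pvPyRange_pos_shift 0 ((cs.drop 12).length : Int) 12 12 (by norm_num),
            List.foldl_map]
        rw [PySem.List.foldl_congr_mem _ _
          (fun acc j => acc.bind fun result =>
            ((pvPairs (PySem.List.slice (cs.drop 12) (some j) (some (j + 12)))).map
              (fun l => l.filter (fun c => c > 0))).map
              (fun items => result ++ [items])) _
          (by
            intro acc x hx
            have hx0 : 0 ≤ x := by
              have := (PySem.List.mem_pyRange_iff_of_pos (by norm_num) x).1 hx
              omega
            have h2 := pvSliceDropShift cs 12 12 x hx0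
            push_cast at h2
            simp only [h2])]
        cases h12 : pvPairs (cs.take 12) with
        | none =>
          simp only [h12, Option.map_none]
          rw [pvFoldlOptNone (fun result j =>
            ((pvPairs (PySem.List.slice (cs.drop 12) (some j) (some (j + 12)))).map
              (fun l => l.filter (fun c => c > 0))).map (fun items => result ++ [items]))]
          rw [hsplit, pvPairs_append_even _ _ (by rw [ht12])]
          simp [← hsplit, h12]
        | some lt =>
          have hlt : lt.length = 6 := by
            have := pvPairs_length _ _ h12; rw [ht12] at this; simpa using this
          simp only [h12, Option.map_some]
          have hrec := ih (cs.drop 12).length (by simp [List.length_drop]; omega)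
            (cs.drop 12) rfl (res ++ [lt.filter (fun c => c > 0)])
          -- hrec's fold body has pvChunkItemsA; rewrite it to the filter form
          simp only [pvChunkItemsA_eq] at hrec
          rw [hrec]
          conv_rhs => rw [hsplit]
          rw [pvPairs_append_even _ _ (by rw [ht12]), h12]
          cases hd : pvPairs (cs.drop 12) with
          | none => simp
          | some lr => simp [pvGroup6_cons lt lr hlt]

-- ===== VERDICT (by name: the statement is the Claim_ definition above) =====
theorem decode_items_timeline_spec : Claim_equal_decode_items_timeline := by
  intro encoded_str _
  unfold Spec_decode_items_timeline decode_items_timeline decode_items_timeline_alt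
  match encoded_str with
  | none => rfl
  | some s =>
    simp only
    by_cases h : s.toList = []
    · simp [h]
    · simp only [h, pvCodesB_eq]
      rw [pvOuter s.toList.length s.toList rfl []]
      cases hp : pvPairs s.toList <;> simp
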